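-- pv_equiv track=rewrite | github.com/JustAFloatingHead/KuhanPiirran | Commands.py | outside_commas
-- ===== SOURCE A (Python) =====
-- def outside_commas(possible_function_str):
--     parenthesis_difference=0
--     outside_indexes=[]
--     for i in range(len(possible_function_str)):
--         if possible_function_str[i]=="(":
--             parenthesis_difference += 1
--         if possible_function_str[i]==")":
--             parenthesis_difference += -1
--         if parenthesis_difference==0 and possible_function_str[i]==",":
--             outside_indexes.append(i)
--
--     return outside_indexes
-- ===== SOURCE B (Python) =====
-- def outside_commas(possible_function_str):
--     # Pass 1: per-character depth deltas, then inclusive prefix-sum depths.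
--     deltas = [1 if ch == "(" else -1 if ch == ")" else 0 for ch in possible_function_str]
--     depths = []
--     total = 0
--     for d in deltas:
--         total += d
--         depths.append(total)
--     # Pass 2: select indices of commas at depth 0.
--     return [i for i, (ch, depth) in enumerate(zip(possible_function_str, depths))
--             if ch == "," and depth == 0]
-- ===== Notes on version B (the rewrite author's own statement) =====
-- stated objective: alternative
-- what changed: Replaces the single fused loop carrying a running counter and output list with two separately-shaped passes: a prefix-sum depth table built first, then a comprehension selecting comma indices where the table is zero.
import Mathlib
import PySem

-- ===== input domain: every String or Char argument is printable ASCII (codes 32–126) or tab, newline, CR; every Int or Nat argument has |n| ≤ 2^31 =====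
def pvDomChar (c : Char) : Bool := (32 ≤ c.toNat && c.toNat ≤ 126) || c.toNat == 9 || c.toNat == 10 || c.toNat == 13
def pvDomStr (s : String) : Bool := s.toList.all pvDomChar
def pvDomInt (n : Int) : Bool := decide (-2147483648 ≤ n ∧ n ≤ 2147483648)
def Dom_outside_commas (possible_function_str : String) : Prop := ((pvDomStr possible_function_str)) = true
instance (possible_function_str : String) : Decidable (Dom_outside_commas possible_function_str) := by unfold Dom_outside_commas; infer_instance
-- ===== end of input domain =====

-- B replaces A's fused counter-and-collect loop by two passes (depth table, then index selection);
-- equivalence is about the return value only; objective: alternative decomposition, same cost.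

-- ===== PORT A =====
-- one fused loop: update the running parenthesis counter, then append the index if a comma at depth 0
def outsideCommasGo (cs : List Char) (i : Int) (diff : Int) (acc : List Int) : List Int :=
  match cs with
  | [] => acc
  | c :: rest =>
    let diff1 := if c = '(' then diff + 1 else diff
    let diff2 := if c = ')' then diff1 - 1 else diff1
    let acc1 := if diff2 = 0 ∧ c = ',' then acc ++ [i] else acc
    outsideCommasGo rest (i + 1) diff2 acc1

def outside_commas (possible_function_str : String) : List Int :=
  outsideCommasGo possible_function_str.toList 0 0 []

-- ===== PORT B =====
-- pass 1a: the delta table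
def ocDelta (c : Char) : Int := if c = '(' then 1 else if c = ')' then -1 else 0
-- pass 1b: the inclusive prefix-sum loop over deltas (total, depths), literal port of B's for-loop
def ocDepths (deltas : List Int) : List Int :=
  (deltas.foldl (fun (st : Int × List Int) d => (st.1 + d, st.2 ++ [st.1 + d])) (0, [])).2
-- pass 2: the comprehension over enumerate(zip(...))
def outside_commas_alt (possible_function_str : String) : List Int :=
  let cs := possible_function_str.toList
  let deltas := cs.map ocDelta
  let depths := ocDepths deltas
  (PySem.List.enumerate (cs.zip depths) 0).filterMap
    (fun p => if p.2.1 = ',' ∧ p.2.2 = 0 then some p.1 else none)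

-- ===== PRECONDITION & SPEC =====
def Spec_outside_commas (possible_function_str : String) (out : List Int) : Prop := out = outside_commas_alt possible_function_str
instance (possible_function_str : String) (out : List Int) : Decidable (Spec_outside_commas possible_function_str out) := by unfold Spec_outside_commas; infer_instance

-- ===== CLAIM (what is proved, stated in full; the proofs are below) =====
def Claim_equal_outside_commas : Prop := ∀ (possible_function_str : String), Dom_outside_commas possible_function_str → Spec_outside_commas possible_function_str (outside_commas possible_function_str)

-- ===== LEMMAS AND PROOFS =====

-- common reference: structural one-pass selection of comma indices at inclusive depth 0
def ocSel (cs : List Char) (i : Int) (d : Int) : List Int :=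
  match cs with
  | [] => []
  | c :: rest =>
    let d' := d + ocDelta c
    (if d' = 0 ∧ c = ',' then [i] else []) ++ ocSel rest (i + 1) d'

-- A's fused loop computes ocSel (accumulator-recursion correspondence)
theorem goA_eq_sel (cs : List Char) (i d : Int) (acc : List Int) :
    outsideCommasGo cs i d acc = acc ++ ocSel cs i d := by
  induction cs generalizing i d acc with
  | nil => simp [outsideCommasGo, ocSel]
  | cons c rest ih =>
    have hd : (if c = ')' then (if c = '(' then d + 1 else d) - 1 else (if c = '(' then d + 1 else d))
        = d + ocDelta c := by
      by_cases h1 : c = '(' <;> by_cases h2 : c = ')' <;> simp_all [ocDelta] <;> try omega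
    simp only [outsideCommasGo, ocSel, hd, ih]
    split <;> simp

-- the generalized cumulative-sum state of B's pass-1 loop
theorem ocDepths_foldl (deltas : List Int) (t : Int) (acc : List Int) :
    (deltas.foldl (fun (st : Int × List Int) d => (st.1 + d, st.2 ++ [st.1 + d])) (t, acc)).2
      = acc ++ deltas.foldr (fun d f t => (t + d) :: f (t + d)) (fun _ => []) t := by
  induction deltas generalizing t acc with
  | nil => simp
  | cons d rest ih => simp [ih]

-- abbreviation for the cumulative-sum list starting at running total t
def ocCum (deltas : List Int) (t : Int) : List Int :=
  deltas.foldr (fun d f t => (t + d) :: f (t + d)) (fun _ => []) t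

-- B's pass 2 over the pass-1 table computes ocSel
theorem selB_eq_sel (cs : List Char) (i t : Int) :
    (PySem.List.enumerate (cs.zip (ocCum (cs.map ocDelta) t)) i).filterMap
      (fun p => if p.2.1 = ',' ∧ p.2.2 = 0 then some p.1 else none) = ocSel cs i t := by
  induction cs generalizing i t with
  | nil => simp [ocCum, ocSel]
  | cons c rest ih =>
    simp only [ocCum, List.map_cons, List.foldr_cons, List.zip_cons_cons,
      PySem.List.enumerate_cons, List.filterMap_cons, ocSel]
    have := ih (i + 1) (t + ocDelta c)
    simp only [ocCum] at this
    rw [this]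
    by_cases h1 : c = ','
    · subst h1
      by_cases h2 : t + ocDelta ',' = 0 <;> simp [h2]
    · simp [h1]

-- ===== VERDICT (by name: the statement is the Claim_ definition above) =====
theorem outside_commas_spec : Claim_equal_outside_commas := by
  intro s _
  show outside_commas s = outside_commas_alt s
  simp only [outside_commas, outside_commas_alt, ocDepths]
  rw [goA_eq_sel, ocDepths_foldl]
  simpa using (selB_eq_sel s.toList 0 0).symm
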